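-- pv_equiv track=rewrite | github.com/inhahe/DirtyFork | common.py | _parse_char_class
-- ===== SOURCE A (Python) =====
-- _CHAR_CLASS_SETS = {
--   'd': set('0123456789'),
--   'w': set('abcdefghijklmnopqrstuvwxyzABCDEFGHIJKLMNOPQRSTUVWXYZ0123456789_'),
--   's': set(' \t\n\r'),
--   'D': set(chr(c) for c in range(32, 127) if chr(c) not in '0123456789'),
--   'W': set(chr(c) for c in range(32, 127) if chr(c) not in 'abcdefghijklmnopqrstuvwxyzABCDEFGHIJKLMNOPQRSTUVWXYZ0123456789_'),
--   'S': set(chr(c) for c in range(33, 127)),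
-- }
--
-- class CharClassError(ValueError):
--   """Raised when a character class spec is invalid."""
--   pass
--
-- def _parse_char_class(spec):
--   """Parse a regex-style character class interior into a set of characters.
--   Supports: literal chars, ranges (a-z, A-\\[), shortcuts (\\d, \\w, \\s),
--   and escaped literals (\\-, \\\\, \\[, \\]).
--   Brackets around the spec are stripped if present.
--   Raises CharClassError on invalid specs (reversed ranges, bad escapes)."""
--   spec = spec.strip()
--   if spec.startswith('[') and spec.endswith(']'):
--     spec = spec[1:-1]
--
--   # Tokenize into (char, set, escaped) tuples.
--   # char: single character or None (if set token)
--   # set: character set or None (if single char)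
--   # escaped: True if this token came from a backslash escape
--   tokens = []
--   i = 0
--   while i < len(spec):
--     if spec[i] == '\\' and i + 1 < len(spec):
--       esc = spec[i + 1]
--       if esc in _CHAR_CLASS_SETS:
--         tokens.append((None, _CHAR_CLASS_SETS[esc], True))
--       else:
--         tokens.append((esc, None, True))  # literal escaped char
--       i += 2
--     elif spec[i] == '\\':
--       raise CharClassError(f"Trailing backslash in allowed_chars: {spec!r}")
--     else:
--       tokens.append((spec[i], None, False))
--       i += 1
--
--   # Process tokens, looking for char-dash-char ranges.
--   # Only an unescaped '-' can be a range separator.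
--   chars = set()
--   j = 0
--   while j < len(tokens):
--     ch, st, esc = tokens[j]
--     # Check for range: single_char  unescaped'-'  single_char
--     if (ch is not None and
--         j + 2 < len(tokens) and
--         tokens[j + 1] == ('-', None, False) and
--         tokens[j + 2][0] is not None):
--       start, end = ord(ch), ord(tokens[j + 2][0])
--       if start > end:
--         raise CharClassError(
--           f"Invalid range '{ch}-{tokens[j+2][0]}' in allowed_chars: "
--           f"start ({ch!r}, {start}) is greater than end ({tokens[j+2][0]!r}, {end})")
--       chars.update(chr(c) for c in range(start, end + 1))
--       j += 3
--     elif ch is not None: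
--       chars.add(ch)
--       j += 1
--     elif st is not None:
--       chars.update(st)
--       j += 1
--     else:
--       j += 1
--   return chars
-- ===== SOURCE B (Python) =====
-- _CHAR_CLASS_SETS = {
--   'd': set('0123456789'),
--   'w': set('abcdefghijklmnopqrstuvwxyzABCDEFGHIJKLMNOPQRSTUVWXYZ0123456789_'),
--   's': set(' \t\n\r'),
--   'D': set(chr(c) for c in range(32, 127) if chr(c) not in '0123456789'),
--   'W': set(chr(c) for c in range(32, 127) if chr(c) not in 'abcdefghijklmnopqrstuvwxyzABCDEFGHIJKLMNOPQRSTUVWXYZ0123456789_'),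
--   'S': set(chr(c) for c in range(33, 127)),
-- }
--
-- class CharClassError(ValueError):
--   """Raised when a character class spec is invalid."""
--   pass
--
-- def _atom(spec, i):
--   """Decode the atom starting at i (i < len(spec)).
--   Returns (char_or_None, set_or_None, next_index)."""
--   c = spec[i]
--   if c != '\\':
--     return (c, None, i + 1)
--   if i + 1 >= len(spec):
--     raise CharClassError(f"Trailing backslash in allowed_chars: {spec!r}")
--   e = spec[i + 1]
--   if e in _CHAR_CLASS_SETS:
--     return (None, _CHAR_CLASS_SETS[e], i + 2)
--   return (e, None, i + 2)
--
-- def _parse_char_class(spec):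
--   """One-pass parser: decode an atom, look ahead for an unescaped '-'
--   followed by another single-char atom to form a range; no token list."""
--   spec = spec.strip()
--   if spec.startswith('[') and spec.endswith(']'):
--     spec = spec[1:-1]
--   chars = set()
--   i = 0
--   while i < len(spec):
--     ch, st, ni = _atom(spec, i)
--     if ch is None:
--       chars.update(st)
--       i = ni
--       continue
--     if ni < len(spec) and spec[ni] == '-' and ni + 1 < len(spec):
--       ch2, st2, ni2 = _atom(spec, ni + 1)
--       if ch2 is not None:
--         if ord(ch) > ord(ch2):
--           raise CharClassError(
--             f"Invalid range '{ch}-{ch2}' in allowed_chars: "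
--             f"start ({ch!r}, {ord(ch)}) is greater than end ({ch2!r}, {ord(ch2)})")
--         chars.update(chr(c) for c in range(ord(ch), ord(ch2) + 1))
--         i = ni2
--         continue
--     chars.add(ch)
--     i = ni
--   return chars
-- ===== Notes on version B (the rewrite author's own statement) =====
-- stated objective: alternative
-- what changed: A tokenizes the whole spec into a (char,set,escaped) token list and then scans the tokens with a triple lookahead; B is a single left-to-right pass that decodes one atom at a time with a small helper and looks ahead directly in the raw string, never materializing a token list.
import Mathlib
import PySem

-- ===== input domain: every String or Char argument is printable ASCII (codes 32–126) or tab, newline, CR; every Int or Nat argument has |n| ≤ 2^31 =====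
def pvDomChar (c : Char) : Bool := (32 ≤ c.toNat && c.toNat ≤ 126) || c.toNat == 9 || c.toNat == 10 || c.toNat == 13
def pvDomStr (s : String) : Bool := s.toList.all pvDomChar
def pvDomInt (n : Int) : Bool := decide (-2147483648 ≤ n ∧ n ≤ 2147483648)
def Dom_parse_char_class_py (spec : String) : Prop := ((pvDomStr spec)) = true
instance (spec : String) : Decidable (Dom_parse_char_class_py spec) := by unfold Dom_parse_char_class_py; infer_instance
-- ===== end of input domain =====

-- B replaces A's tokenize-then-scan (materialised token list, second pass with
-- triple lookahead over tokens) by a single left-to-right pass that decodes one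
-- atom at a time and looks ahead in the raw string; same result set (alternative
-- decomposition, no intermediate token list).

-- ===== PORT A =====
-- shared module constants (_CHAR_CLASS_SETS values, as PySem sets of 1-char strings)
def ccSetLower : List Char := "abcdefghijklmnopqrstuvwxyzABCDEFGHIJKLMNOPQRSTUVWXYZ0123456789_".toList

def ccSet_d : List String := PySem.Set.ofList ("0123456789".toList.map (fun c => String.ofList [c]))
def ccSet_w : List String := PySem.Set.ofList (ccSetLower.map (fun c => String.ofList [c]))
def ccSet_s : List String := PySem.Set.ofList (" \t\n\r".toList.map (fun c => String.ofList [c]))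
def ccSet_D : List String := PySem.Set.ofList
  (((PySem.List.pyRange 32 127 1).filter
      (fun n => !(PySem.Str.isIn (String.ofList [Char.ofNat n.toNat]) "0123456789"))).map
    (fun n => String.ofList [Char.ofNat n.toNat]))
def ccSet_W : List String := PySem.Set.ofList
  (((PySem.List.pyRange 32 127 1).filter
      (fun n => !(PySem.Str.isIn (String.ofList [Char.ofNat n.toNat])
                    "abcdefghijklmnopqrstuvwxyzABCDEFGHIJKLMNOPQRSTUVWXYZ0123456789_"))).map
    (fun n => String.ofList [Char.ofNat n.toNat]))
def ccSet_S : List String := PySem.Set.ofList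
  ((PySem.List.pyRange 33 127 1).map (fun n => String.ofList [Char.ofNat n.toNat]))

-- 'esc in _CHAR_CLASS_SETS' + '_CHAR_CLASS_SETS[esc]' as one lookup
def ccLookup (e : Char) : Option (List String) :=
  if e = 'd' then some ccSet_d
  else if e = 'w' then some ccSet_w
  else if e = 's' then some ccSet_s
  else if e = 'D' then some ccSet_D
  else if e = 'W' then some ccSet_W
  else if e = 'S' then some ccSet_S
  else none

-- 'chr(c) for c in range(ord(a), ord(b) + 1)' (identical expression in both Pythons)
def ccRange (a b : Char) : List String :=
  (PySem.List.pyRange (a.toNat : Int) ((b.toNat : Int) + 1) 1).map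
    (fun n => String.ofList [Char.ofNat n.toNat])

-- 'spec = spec.strip(); if spec.startswith('[') and spec.endswith(']'): spec = spec[1:-1]'
-- (identical preprocessing lines in both Pythons)
def ccStrip (spec : String) : List Char :=
  let s := PySem.Str.strip spec
  let s := if PySem.Str.startswith s "[" && PySem.Str.endswith s "]"
           then PySem.Str.slice s (some 1) (some (-1)) else s
  s.toList

-- A's token tuples (char, set, escaped): chr c esc ↔ (c, None, esc), cls s ↔ (None, s, True)
inductive CCTok where
  | chr : Char → Bool → CCTok
  | cls : List String → CCTok
deriving DecidableEq, Repr

-- A's first while loop (tokenizer); none = CharClassError "Trailing backslash"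
def tokA : List Char → Option (List CCTok)
  | [] => some []
  | c :: rest =>
    if c = '\\' then
      match rest with
      | [] => none
      | e :: rest' =>
        match ccLookup e with
        | some s => (tokA rest').map (fun ts => CCTok.cls s :: ts)
        | none => (tokA rest').map (fun ts => CCTok.chr e true :: ts)
    else (tokA rest).map (fun ts => CCTok.chr c false :: ts)

-- A's second while loop; none = CharClassError "Invalid range".
-- (A's final 'else: j += 1' is unreachable: every token has a char or a set.)
def procA : List CCTok → PySem.Set String → Option (PySem.Set String)
  | [], acc => some acc
  | .chr c _ :: .chr '-' false :: .chr c2 _ :: ts, acc =>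
    if c.toNat > c2.toNat then none
    else procA ts (PySem.Set.update acc (ccRange c c2))
  | .chr c _ :: ts, acc => procA ts (PySem.Set.add acc (String.ofList [c]))
  | .cls s :: ts, acc => procA ts (PySem.Set.update acc s)

def parse_char_class_py (spec : String) : List String :=
  ((tokA (ccStrip spec)).bind (fun ts => procA ts PySem.Set.empty)).getD []

-- ===== PORT B =====
-- B's _atom helper: decode the atom at the front; none = CharClassError (trailing backslash)
def atomB : List Char → Option ((Char ⊕ List String) × List Char)
  | [] => none            -- never reached from parseB (only called when i < len)
  | c :: rest =>
    if c = '\\' then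
      match rest with
      | [] => none
      | e :: rest' =>
        match ccLookup e with
        | some s => some (Sum.inr s, rest')
        | none => some (Sum.inl e, rest')
    else some (Sum.inl c, rest)

-- B's single while loop; fuel is only a totality guard (one char is consumed per
-- step, so fuel = length of the list suffices); none = CharClassError
def parseB : Nat → List Char → PySem.Set String → Option (PySem.Set String)
  | _, [], acc => some acc
  | 0, _ :: _, _ => none
  | fuel+1, c :: rest, acc =>
    match atomB (c :: rest) with
    | none => none
    | some (Sum.inr s, r) => parseB fuel r (PySem.Set.update acc s)
    | some (Sum.inl ch, r) =>
      match r with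
      | '-' :: r2 =>
        if r2.isEmpty then parseB fuel r (PySem.Set.add acc (String.ofList [ch]))
        else
          match atomB r2 with
          | none => none
          | some (Sum.inr _, _) => parseB fuel r (PySem.Set.add acc (String.ofList [ch]))
          | some (Sum.inl c2, r3) =>
            if ch.toNat > c2.toNat then none
            else parseB fuel r3 (PySem.Set.update acc (ccRange ch c2))
      | _ => parseB fuel r (PySem.Set.add acc (String.ofList [ch]))

def parse_char_class_py_alt (spec : String) : List String :=
  let cs := ccStrip spec
  (parseB cs.length cs PySem.Set.empty).getD []

-- ===== PRECONDITION & SPEC =====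
-- Pre_ excludes exactly the specs on which A raises CharClassError: a trailing
-- backslash, or a reversed range start-'-'-end with ord(start) > ord(end).
-- ccValid is a grammar-membership check on the raw characters (state = the
-- pending single-char atom that could start a range); it keeps no result data.
def ccValid : Option Char → List Char → Bool
  | _, [] => true
  | none, c :: r =>
    if c = '\\' then
      match r with
      | [] => false
      | e :: r' => if (ccLookup e).isSome then ccValid none r' else ccValid (some e) r'
    else ccValid (some c) r
  | some p, c :: r =>
    if c = '-' then
      match r with
      | [] => true
      | x :: r2 =>
        if x = '\\' then
          match r2 with
          | [] => false
          | e2 :: r3 =>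
            if (ccLookup e2).isSome then ccValid none r3
            else decide (p.toNat ≤ e2.toNat) && ccValid none r3
        else decide (p.toNat ≤ x.toNat) && ccValid none r2
    else
      if c = '\\' then
        match r with
        | [] => false
        | e :: r' => if (ccLookup e).isSome then ccValid none r' else ccValid (some e) r'
      else ccValid (some c) r

def Pre_parse_char_class_py (spec : String) : Prop := ccValid none (ccStrip spec) = true
instance (spec : String) : Decidable (Pre_parse_char_class_py spec) := by
  unfold Pre_parse_char_class_py; infer_instance

def pvWitness_parse_char_class_py : String := "a-z"

def Spec_parse_char_class_py (spec : String) (out : List String) : Prop :=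
  out = parse_char_class_py_alt spec
instance (spec : String) (out : List String) : Decidable (Spec_parse_char_class_py spec out) := by
  unfold Spec_parse_char_class_py; infer_instance

-- ===== CLAIM (what is proved, stated in full; the proofs are below) =====
def Claim_equal_parse_char_class_py : Prop :=
  ∀ (spec : String), Dom_parse_char_class_py spec → Pre_parse_char_class_py spec →
    Spec_parse_char_class_py spec (parse_char_class_py spec)

-- ===== LEMMAS AND PROOFS =====

-- simp-friendly restatements of the ports' equation lemmas
theorem tokA_ch (c : Char) (h : ¬ c = '\\') (r : List Char) :
    tokA (c :: r) = (tokA r).map (fun ts => CCTok.chr c false :: ts) := by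
  cases r with
  | nil => simp [tokA.eq_2, h]
  | cons a l => simp [tokA.eq_3, h]

theorem tokA_bs_cls (e : Char) (s : List String) (hl : ccLookup e = some s) (r : List Char) :
    tokA ('\\' :: e :: r) = (tokA r).map (fun ts => CCTok.cls s :: ts) := by
  simp [tokA.eq_3, hl]

theorem tokA_bs_chr (e : Char) (hl : ccLookup e = none) (r : List Char) :
    tokA ('\\' :: e :: r) = (tokA r).map (fun ts => CCTok.chr e true :: ts) := by
  simp [tokA.eq_3, hl]

theorem atomB_ch (c : Char) (h : ¬ c = '\\') (r : List Char) :
    atomB (c :: r) = some (Sum.inl c, r) := by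
  cases r with
  | nil => simp [atomB.eq_2, h]
  | cons a l => simp [atomB.eq_3, h]

theorem atomB_bs_cls (e : Char) (s : List String) (hl : ccLookup e = some s) (r : List Char) :
    atomB ('\\' :: e :: r) = some (Sum.inr s, r) := by
  simp [atomB.eq_3, hl]

theorem atomB_bs_chr (e : Char) (hl : ccLookup e = none) (r : List Char) :
    atomB ('\\' :: e :: r) = some (Sum.inl e, r) := by
  simp [atomB.eq_3, hl]

-- A single-char token followed by anything other than an unescaped '-' token
-- just adds its character (A's elif branch)
theorem procA_add (c : Char) (b : Bool) (ts : List CCTok) (acc : PySem.Set String)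
    (hts : ∀ (c2 : Char) (a : Bool) (ts1 : List CCTok),
        ts = CCTok.chr '-' false :: CCTok.chr c2 a :: ts1 → False) :
    procA (CCTok.chr c b :: ts) acc = procA ts (PySem.Set.add acc (String.ofList [c])) :=
  procA.eq_3 acc c b ts hts

-- Core step lemma: after decoding a single-char atom (char c, raw remainder r),
-- A's token scan and B's raw-string lookahead continue identically
theorem charStep (f : Nat)
    (IH : ∀ cs, cs.length ≤ f → ∀ acc, (tokA cs).bind (fun ts => procA ts acc) = parseB f cs acc)
    (cs r : List Char) (c : Char) (b : Bool)
    (h : atomB cs = some (Sum.inl c, r))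
    (htok : tokA cs = (tokA r).map (fun ts => CCTok.chr c b :: ts))
    (hr : r.length ≤ f) (acc : PySem.Set String) :
    (tokA cs).bind (fun ts => procA ts acc) = parseB (f + 1) cs acc := by
  obtain ⟨c0, rest, rfl⟩ : ∃ c0 rest, cs = c0 :: rest := by
    cases cs with
    | nil => rw [atomB.eq_1] at h; cases h
    | cons c0 rest => exact ⟨c0, rest, rfl⟩
  rw [htok, parseB.eq_3, h]
  cases r with
  | nil =>
    rw [tokA.eq_1]
    simp only [Option.map_some, Option.bind_some]
    rw [procA_add c b [] acc (by intro _ _ _ hh; cases hh), procA.eq_1, parseB.eq_1]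
  | cons d r2 =>
    by_cases hd : d = '-'
    · subst hd
      cases r2 with
      | nil =>
        obtain ⟨f', rfl⟩ : ∃ f', f = f' + 1 :=
          ⟨f - 1, by simp only [List.length_cons, List.length_nil] at hr; omega⟩
        rw [tokA_ch '-' (by decide) [], tokA.eq_1]
        simp only [Option.map_some, Option.bind_some]
        rw [procA_add c b _ acc
              (by intro _ _ _ hh; injection hh with _ hh2; cases hh2),
            procA_add '-' false [] _ (by intro _ _ _ hh; cases hh), procA.eq_1]
        simp only [List.isEmpty_nil, if_true]
        rw [parseB.eq_3, atomB.eq_2]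
        simp [parseB.eq_1]
      | cons x xs =>
        by_cases hx : x = '\\'
        · subst hx
          cases xs with
          | nil =>
            rw [tokA_ch '-' (by decide), tokA.eq_2]
            simp [atomB.eq_2]
          | cons e r3 =>
            cases hl : ccLookup e with
            | some s =>
              have hIH := IH ('-' :: '\\' :: e :: r3) hr
                (PySem.Set.add acc (String.ofList [c]))
              rw [tokA_ch '-' (by decide), tokA_bs_cls e s hl] at hIH ⊢
              cases ht : tokA r3 with
              | none =>
                try rw [ht] at hIH
                simp only [Option.map_none, Option.bind_none] at hIH ⊢
                simpa [atomB_bs_cls e s hl, List.isEmpty_cons] using hIH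
              | some ts =>
                try rw [ht] at hIH
                simp only [Option.map_some, Option.bind_some] at hIH ⊢
                rw [procA_add c b _ acc
                      (by intro _ _ _ hh; injection hh with _ hh2; injection hh2 with hh3 _; cases hh3)]
                simpa [atomB_bs_cls e s hl, List.isEmpty_cons] using hIH
            | none =>
              rw [tokA_ch '-' (by decide), tokA_bs_chr e hl]
              have hlen : r3.length ≤ f := by simp only [List.length_cons] at hr; omega
              have hIH := IH r3 hlen (PySem.Set.update acc (ccRange c e))
              cases ht : tokA r3 with
              | none =>
                try rw [ht] at hIH
                simp only [Option.map_none, Option.bind_none] at hIH ⊢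
                simp [atomB_bs_chr e hl, List.isEmpty_cons]
                intro _
                exact hIH
              | some ts =>
                try rw [ht] at hIH
                simp only [Option.map_some, Option.bind_some] at hIH ⊢
                rw [procA.eq_2]
                simp [atomB_bs_chr e hl, List.isEmpty_cons]
                split_ifs with hcmp
                · rfl
                · exact hIH
        · -- x is a plain char: range c-x
          rw [tokA_ch '-' (by decide), tokA_ch x hx]
          have hlen : xs.length ≤ f := by simp only [List.length_cons] at hr; omega
          have hIH := IH xs hlen (PySem.Set.update acc (ccRange c x))
          cases ht : tokA xs with
          | none =>
            try rw [ht] at hIH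
            simp only [Option.map_none, Option.bind_none] at hIH ⊢
            simp [atomB_ch x hx, List.isEmpty_cons]
            intro _
            exact hIH
          | some ts =>
            try rw [ht] at hIH
            simp only [Option.map_some, Option.bind_some] at hIH ⊢
            rw [procA.eq_2]
            simp [atomB_ch x hx, List.isEmpty_cons]
            split_ifs with hcmp
            · rfl
            · exact hIH
    · -- d ≠ '-': no range separator; add c and continue from r
      have hIH := IH (d :: r2) hr (PySem.Set.add acc (String.ofList [c]))
      by_cases hdb : d = '\\'
      · subst hdb
        cases r2 with
        | nil =>
          rw [tokA.eq_2] at hIH ⊢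
          simpa using hIH
        | cons e r'' =>
          cases hl : ccLookup e with
          | some s =>
            rw [tokA_bs_cls e s hl] at hIH ⊢
            cases ht : tokA r'' with
            | none =>
              try rw [ht] at hIH
              simpa using hIH
            | some ts =>
              try rw [ht] at hIH
              simp only [Option.map_some, Option.bind_some] at hIH ⊢
              rw [procA_add c b _ acc (by intro _ _ _ hh; injection hh with hh1 _; cases hh1)]
              exact hIH
          | none =>
            rw [tokA_bs_chr e hl] at hIH ⊢
            cases ht : tokA r'' with
            | none =>
              try rw [ht] at hIH
              simpa using hIH
            | some ts =>
              try rw [ht] at hIH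
              simp only [Option.map_some, Option.bind_some] at hIH ⊢
              rw [procA_add c b _ acc
                    (by intro _ _ _ hh; injection hh with hh1 _; injection hh1 with _ hb; cases hb)]
              exact hIH
      · rw [tokA_ch d hdb] at hIH ⊢
        cases ht : tokA r2 with
        | none =>
          try rw [ht] at hIH
          simp only [Option.map_none, Option.bind_none] at hIH ⊢
          split
          all_goals first
            | exact hIH
            | simp_all
        | some ts =>
          try rw [ht] at hIH
          simp only [Option.map_some, Option.bind_some] at hIH ⊢
          rw [procA_add c b _ acc
                (by intro _ _ _ hh; injection hh with hh1 _; injection hh1 with hd' _; exact hd hd')]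
          split
          all_goals first
            | exact hIH
            | simp_all

theorem tokA_procA_eq_parseB :
    ∀ (fuel : Nat) (cs : List Char), cs.length ≤ fuel → ∀ (acc : PySem.Set String),
      (tokA cs).bind (fun ts => procA ts acc) = parseB fuel cs acc := by
  intro fuel
  induction fuel with
  | zero =>
    intro cs h acc
    have : cs = [] := List.eq_nil_of_length_eq_zero (Nat.le_zero.mp h)
    subst this
    simp [tokA.eq_1, procA.eq_1, parseB.eq_1]
  | succ f IH =>
    intro cs h acc
    cases cs with
    | nil => simp [tokA.eq_1, procA.eq_1, parseB.eq_1]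
    | cons c0 rest =>
      by_cases hc : c0 = '\\'
      · subst hc
        cases rest with
        | nil =>
          rw [tokA.eq_2, parseB.eq_3, atomB.eq_2]
          simp
        | cons e r =>
          cases hl : ccLookup e with
          | some s =>
            have hIH := IH r (by simp only [List.length_cons] at h; omega)
              (PySem.Set.update acc s)
            rw [tokA_bs_cls e s hl, parseB.eq_3, atomB_bs_cls e s hl]
            cases ht : tokA r with
            | none =>
              try rw [ht] at hIH
              simpa using hIH
            | some ts =>
              try rw [ht] at hIH
              simp only [Option.map_some, Option.bind_some] at hIH ⊢
              rw [procA.eq_4]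
              exact hIH
          | none =>
            exact charStep f IH ('\\' :: e :: r) r e true (atomB_bs_chr e hl r)
              (tokA_bs_chr e hl r) (by simp only [List.length_cons] at h; omega) acc
      · exact charStep f IH (c0 :: rest) rest c0 false (atomB_ch c0 hc rest)
          (tokA_ch c0 hc rest) (by simp only [List.length_cons] at h; omega) acc

theorem ports_eq (spec : String) : parse_char_class_py spec = parse_char_class_py_alt spec := by
  unfold parse_char_class_py parse_char_class_py_alt
  rw [tokA_procA_eq_parseB (ccStrip spec).length (ccStrip spec) le_rfl]

-- ===== VERDICT (by name: the statement is the Claim_ definition above) =====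
theorem parse_char_class_py_spec : Claim_equal_parse_char_class_py := by
  intro spec _ _
  unfold Spec_parse_char_class_py
  exact ports_eq spec
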